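-- pv_equiv track=rewrite | github.com/career-prep/ucp-namer-latam-2026 | aungnanda_oo/q2_UniqueSum.py | UniqueSum
-- ===== SOURCE A (Python) =====
-- def UniqueSum(arr: list[int]) -> int:
--     seen = set()
--     total = 0
--     for num in arr:
--         if num not in seen:
--             seen.add(num)
--             total += num
--     return total
-- ===== SOURCE B (Python) =====
-- def UniqueSum(arr: list[int]) -> int:
--     total = 0
--     rest = arr
--     while rest:
--         head = rest[0]
--         total += head
--         rest = [x for x in rest[1:] if x != head]
--     return total
-- ===== Notes on version B (the rewrite author's own statement) =====
-- stated objective: alternative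
-- what changed: Replaces A's single-pass seen-set/accumulator loop by a filter-out worklist: repeatedly take the head of the remaining list, add it once, and delete all its duplicates by rebuilding the worklist with a filter; no set and no membership branch are used.
import Mathlib
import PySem

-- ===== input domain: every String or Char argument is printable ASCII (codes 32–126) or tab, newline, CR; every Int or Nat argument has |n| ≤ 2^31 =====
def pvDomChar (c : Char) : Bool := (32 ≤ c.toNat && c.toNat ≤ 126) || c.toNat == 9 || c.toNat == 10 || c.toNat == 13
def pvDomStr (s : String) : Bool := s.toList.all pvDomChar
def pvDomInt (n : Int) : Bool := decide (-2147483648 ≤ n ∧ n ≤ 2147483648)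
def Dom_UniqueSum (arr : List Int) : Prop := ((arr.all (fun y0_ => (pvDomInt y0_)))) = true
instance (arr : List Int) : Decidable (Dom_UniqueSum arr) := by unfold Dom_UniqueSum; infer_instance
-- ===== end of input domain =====

-- B replaces A's seen-set/accumulator loop by a filter-out worklist (add the head once,
-- delete its duplicates by filtering, continue on the remainder); objective: alternative.

-- ===== PORT A =====
-- for num in arr: if num not in seen: seen.add(num); total += num
def UniqueSum (arr : List Int) : Int :=
  (arr.foldl
    (fun (st : PySem.Set Int × Int) num =>
      if ¬ PySem.Set.contains st.1 num then (PySem.Set.add st.1 num, st.2 + num) else st)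
    (PySem.Set.empty, 0)).2

-- ===== PORT B =====
-- while rest: head = rest[0]; total += head; rest = [x for x in rest[1:] if x != head]
def uniqueSumLoop : Int → List Int → Int
  | total, [] => total
  | total, h :: t => uniqueSumLoop (total + h) (t.filter (fun x => decide (x ≠ h)))
termination_by _ l => l.length
decreasing_by
  simp only [List.length_unattach, List.length_cons]
  exact Nat.lt_succ_of_le (le_trans (List.length_filter_le _ _) (le_of_eq List.length_attach))

def UniqueSum_alt (arr : List Int) : Int := uniqueSumLoop 0 arr

-- ===== PRECONDITION & SPEC =====
def Spec_UniqueSum (arr : List Int) (out : Int) : Prop := out = UniqueSum_alt arr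
instance (arr : List Int) (out : Int) : Decidable (Spec_UniqueSum arr out) := by unfold Spec_UniqueSum; infer_instance

-- ===== CLAIM (what is proved, stated in full; the proofs are below) =====
def Claim_equal_UniqueSum : Prop := ∀ (arr : List Int), Dom_UniqueSum arr → Spec_UniqueSum arr (UniqueSum arr)

-- ===== LEMMAS AND PROOFS =====
-- A's fold invariant: the accumulator grows by the sum of newly-seen elements.
theorem uniqueSum_fold_inv (xs : List Int) (s : PySem.Set Int) (t : Int) :
    (xs.foldl
      (fun (st : PySem.Set Int × Int) num =>
        if ¬ PySem.Set.contains st.1 num then (PySem.Set.add st.1 num, st.2 + num) else st)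
      (s, t))
    = (PySem.Set.update s xs, t + ((PySem.Set.update s xs).sum - s.sum)) := by
  induction xs generalizing s t with
  | nil => simp [PySem.Set.update]
  | cons x xs ih =>
      simp only [List.foldl_cons]
      by_cases h : PySem.Set.contains s x
      · have hmem : x ∈ s := by simpa using h
        have hadd : PySem.Set.add s x = s := by simp [PySem.Set.add, hmem]
        simp only [h, not_true_eq_false, if_false]
        rw [ih]
        have : PySem.Set.update s (x :: xs) = PySem.Set.update s xs := by
          simp [PySem.Set.update, hadd]
        rw [this]
      · have hmem : x ∉ s := by simpa using h
        have hadd : PySem.Set.add s x = s ++ [x] := by simp [PySem.Set.add, hmem]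
        simp only [h, Bool.false_eq_true, not_false_eq_true, if_true, hadd]
        rw [ih]
        have hupd : PySem.Set.update s (x :: xs) = PySem.Set.update (s ++ [x]) xs := by
          simp [PySem.Set.update, hadd]
        rw [hupd]
        have hs : (s ++ [x] : List Int).sum = s.sum + x := by simp
        refine Prod.ext rfl ?_
        simp only [hs]
        ring

-- Any nodup list sums to the Finset sum over its elements.
theorem sum_nodup_toFinset (l : List Int) (h : l.Nodup) :
    l.sum = ∑ x ∈ l.toFinset, x := by
  induction l with
  | nil => simp
  | cons a t ih =>
      simp only [List.nodup_cons] at h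
      rw [List.sum_cons, List.toFinset_cons, Finset.sum_insert (by simpa using h.1), ih h.2]

-- B's worklist loop equals the running total plus the Finset sum of the distinct remainder.
theorem uniqueSum_alt_eq_finsetSum (l : List Int) :
    UniqueSum_alt l = ∑ x ∈ l.toFinset, x := by
  have key : ∀ (n : Nat) (l : List Int) (total : Int), l.length ≤ n →
      uniqueSumLoop total l = total + ∑ x ∈ l.toFinset, x := by
    intro n
    induction n with
    | zero =>
        intro l total hl
        have : l = [] := List.eq_nil_of_length_eq_zero (Nat.le_zero.mp hl)
        simp [this, uniqueSumLoop]
    | succ n ih =>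
        intro l total hl
        match l with
        | [] => simp [uniqueSumLoop]
        | h :: t =>
          rw [uniqueSumLoop]
          rw [ih (t.filter (fun x => decide (x ≠ h))) (total + h)
                (le_trans (List.length_filter_le _ _) (by simpa [List.length_cons] using Nat.le_of_succ_le_succ hl))]
          have hf : (t.filter (fun x => decide (x ≠ h))).toFinset = t.toFinset.erase h := by
            ext x
            simp [Finset.mem_erase, and_comm]
          rw [hf]
          rw [List.toFinset_cons, ← Finset.insert_erase (s := insert h t.toFinset)
                (a := h) (Finset.mem_insert_self _ _), Finset.erase_insert_eq_erase,
              Finset.sum_insert (Finset.notMem_erase _ _)]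
          ring
  have := key l.length l 0 le_rfl
  simpa [UniqueSum_alt] using this

-- ===== VERDICT (by name: the statement is the Claim_ definition above) =====
theorem UniqueSum_spec : Claim_equal_UniqueSum := by
  intro arr _
  unfold Spec_UniqueSum UniqueSum
  rw [uniqueSum_fold_inv]
  have h : PySem.Set.update PySem.Set.empty arr = PySem.Set.ofList arr := by
    simp [PySem.Set.update, PySem.Set.ofList_eq_foldl, PySem.Set.empty]
  rw [h]
  have hnd : (PySem.Set.ofList arr).Nodup := PySem.Set.nodup_ofList arr
  have hfs : (PySem.Set.ofList arr : List Int).toFinset = arr.toFinset := by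
    ext x; simp [PySem.Set.mem_ofList]
  rw [uniqueSum_alt_eq_finsetSum, ← hfs, ← sum_nodup_toFinset _ hnd]
  simp [PySem.Set.empty]
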